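-- pv_equiv track=rewrite | github.com/sayedmahmoud266/quran-ai-transcriping | app/pipeline/steps/transcription_alignment.py | _merge_repeats
-- ===== SOURCE A (Python) =====
-- def _merge_repeats(path, transcript):
--     """Merge repeated characters."""
--     i1, i2 = path[0]
--     segments = []
--
--     for i, (t, j) in enumerate(path[1:], start=1):
--         if j != i2:
--             segments.append((transcript[i2], i1, t, path[i][0] - i1))
--             i1, i2 = t, j
--
--     segments.append((transcript[i2], i1, path[-1][0], path[-1][0] - i1))
--     return segments
-- ===== SOURCE B (Python) =====
-- def _merge_repeats(path, transcript):
--     """Merge repeated characters."""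
--     # Phase 1: collapse path into consecutive groups [target_j, first_t, last_t].
--     groups = []
--     for t, j in path:
--         if groups and groups[-1][0] == j:
--             groups[-1][2] = t
--         else:
--             groups.append([j, t, t])
--     # Phase 2: pair each group with its successor; the end coordinate is the
--     # next group's first t, or the group's own last t for the final group.
--     out = []
--     for (j, first_t, last_t), nxt in zip(groups, groups[1:] + [None]):
--         end = nxt[1] if nxt is not None else last_t
--         out.append((transcript[j], first_t, end, end - first_t))
--     return out
-- ===== Notes on version B (the rewrite author's own statement) =====
-- stated objective: alternative
-- what changed: Replaces A's single stateful scan (tracking the open group's start in loop variables and reading path[i]/path[-1] by index) with a two-phase decomposition: first collapse the path into a list of consecutive same-target groups (target, first_t, last_t), then emit one segment per group by zipping each group with its successor; no index arithmetic into path remains.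
import Mathlib
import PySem

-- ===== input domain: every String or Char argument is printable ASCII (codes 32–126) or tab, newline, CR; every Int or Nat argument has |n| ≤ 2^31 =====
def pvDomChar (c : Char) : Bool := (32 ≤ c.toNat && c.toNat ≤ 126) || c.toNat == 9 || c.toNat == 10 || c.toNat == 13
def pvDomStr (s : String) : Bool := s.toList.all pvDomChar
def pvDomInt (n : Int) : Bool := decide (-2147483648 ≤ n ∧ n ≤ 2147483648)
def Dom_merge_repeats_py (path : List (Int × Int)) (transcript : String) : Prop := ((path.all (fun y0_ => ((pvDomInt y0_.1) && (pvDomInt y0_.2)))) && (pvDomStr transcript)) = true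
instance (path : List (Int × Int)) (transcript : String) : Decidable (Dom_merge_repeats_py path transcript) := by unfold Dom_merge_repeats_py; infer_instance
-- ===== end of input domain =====

-- B replaces A's single stateful index-tracking scan by a two-phase decomposition
-- (collapse into consecutive same-target groups, then emit one segment per group
-- paired with its successor); same cost, no index arithmetic into path.


-- ===== PORT A =====
-- transcript[i2] (Python raises IndexError when out of range; such inputs are outside Pre_)
def pvCharAt (transcript : String) (j : Int) : String :=
  match PySem.Str.pyGet? transcript j with
  | some c => String.ofList [c]
  | none => ""

-- literal port of A's loop body; the Python reads `path[i][0]`, which by the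
-- enumerate invariant is exactly `t`, the first component of the current element —
-- ported as `t` (exact), so the index `i` is not needed.
def pvAStep (transcript : String) (st : Int × Int × List (String × Int × Int × Int))
    (tj : Int × Int) : Int × Int × List (String × Int × Int × Int) :=
  let (i1, i2, segments) := st
  let (t, j) := tj
  if j ≠ i2 then (t, j, segments ++ [(pvCharAt transcript i2, i1, t, t - i1)])
  else (i1, i2, segments)

def merge_repeats_py (path : List (Int × Int)) (transcript : String) : List (String × Int × Int × Int) :=
  match path with
  | [] => []   -- Python raises IndexError at path[0]; excluded by Pre_
  | (t0, j0) :: rest =>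
    let (i1, i2, segments) := rest.foldl (pvAStep transcript) (t0, j0, [])
    let lastT := ((PySem.List.pyGet? path (-1)).getD (0, 0)).1   -- path[-1][0]
    segments ++ [(pvCharAt transcript i2, i1, lastT, lastT - i1)]

-- ===== PORT B =====
-- phase 1 of Source B: fold building the group list with the newest group at the head
-- (Python mutates groups[-1]); reversed afterwards.  group = (j, first_t, last_t)
def pvGrpStep (acc : List (Int × Int × Int)) (tj : Int × Int) : List (Int × Int × Int) :=
  match acc with
  | (j', ft, lt) :: tl =>
      if tj.2 = j' then (j', ft, tj.1) :: tl
      else (tj.2, tj.1, tj.1) :: (j', ft, lt) :: tl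
  | [] => [(tj.2, tj.1, tj.1)]

-- phase 2 of Source B: zip(groups, groups[1:] + [None]) — each group paired with its successor
def pvEmit (transcript : String) : List (Int × Int × Int) → List (String × Int × Int × Int)
  | [] => []
  | [(j, ft, lt)] => [(pvCharAt transcript j, ft, lt, lt - ft)]
  | (j, ft, _) :: g2 :: tl =>
      (pvCharAt transcript j, ft, g2.2.1, g2.2.1 - ft) :: pvEmit transcript (g2 :: tl)

def merge_repeats_py_alt (path : List (Int × Int)) (transcript : String) : List (String × Int × Int × Int) :=
  pvEmit transcript ((path.foldl pvGrpStep []).reverse)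

-- ===== PRECONDITION & SPEC =====
-- Pre_ excludes exactly the inputs where Python A raises: the empty path
-- (IndexError at path[0]) and paths where some group-start target index is not a
-- valid (possibly negative) index into transcript (IndexError at transcript[i2]).
def Pre_merge_repeats_py (path : List (Int × Int)) (transcript : String) : Prop :=
  path ≠ [] ∧ ∀ i ∈ List.range path.length,
    (i = 0 ∨ (path[i]!).2 ≠ (path[i-1]!).2) → (PySem.Str.pyGet? transcript (path[i]!).2).isSome
instance (path : List (Int × Int)) (transcript : String) : Decidable (Pre_merge_repeats_py path transcript) := by unfold Pre_merge_repeats_py; infer_instance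
def pvWitness_merge_repeats_py : (List (Int × Int)) × String := ([(0, 0), (3, 0), (5, 1)], "ab")

def Spec_merge_repeats_py (path : List (Int × Int)) (transcript : String) (out : List (String × Int × Int × Int)) : Prop := out = merge_repeats_py_alt path transcript
instance (path : List (Int × Int)) (transcript : String) (out : List (String × Int × Int × Int)) : Decidable (Spec_merge_repeats_py path transcript out) := by unfold Spec_merge_repeats_py; infer_instance

-- ===== CLAIM (what is proved, stated in full; the proofs are below) =====
def Claim_equal_merge_repeats_py : Prop := ∀ (path : List (Int × Int)) (transcript : String), Dom_merge_repeats_py path transcript → Pre_merge_repeats_py path transcript → Spec_merge_repeats_py path transcript (merge_repeats_py path transcript)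

-- ===== LEMMAS AND PROOFS =====

-- common recursive characterisation: current group started at (i1 target i2),
-- T is the fixed end coordinate of the final segment (path[-1][0])
def pvSpecA (transcript : String) (i1 i2 T : Int) : List (Int × Int) → List (String × Int × Int × Int)
  | [] => [(pvCharAt transcript i2, i1, T, T - i1)]
  | (t, j) :: r =>
      if j ≠ i2 then (pvCharAt transcript i2, i1, t, t - i1) :: pvSpecA transcript t j T r
      else pvSpecA transcript i1 i2 T r

-- A's fold equals pvSpecA (for any fixed final coordinate T)
theorem pvA_fold (transcript : String) (l : List (Int × Int)) :
    ∀ (i1 i2 T : Int) (segs : List (String × Int × Int × Int)),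
    (l.foldl (pvAStep transcript) (i1, i2, segs)).2.2 ++
      [(pvCharAt transcript (l.foldl (pvAStep transcript) (i1, i2, segs)).2.1,
        (l.foldl (pvAStep transcript) (i1, i2, segs)).1, T,
        T - (l.foldl (pvAStep transcript) (i1, i2, segs)).1)]
    = segs ++ pvSpecA transcript i1 i2 T l := by
  induction l with
  | nil => intro i1 i2 T segs; simp [pvSpecA]
  | cons hd tl ih =>
      intro i1 i2 T segs
      obtain ⟨t, j⟩ := hd
      by_cases h : j = i2
      · simp [pvAStep, pvSpecA, h, ih]
      · simp only [List.foldl_cons, pvAStep, pvSpecA]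
        rw [if_pos h, if_pos h]
        rw [ih t j T (segs ++ [(pvCharAt transcript i2, i1, t, t - i1)])]
        simp

-- front-recursive form of the grouping fold
def pvGrpF (j ft lt : Int) : List (Int × Int) → List (Int × Int × Int)
  | [] => [(j, ft, lt)]
  | (t, j') :: r => if j' = j then pvGrpF j ft t r else (j, ft, lt) :: pvGrpF j' t t r

theorem pvGrp_fold (l : List (Int × Int)) :
    ∀ (j ft lt : Int) (tl : List (Int × Int × Int)),
    (l.foldl pvGrpStep ((j, ft, lt) :: tl)).reverse = tl.reverse ++ pvGrpF j ft lt l := by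
  induction l with
  | nil => intro j ft lt tl; simp [pvGrpF]
  | cons hd tl' ih =>
      intro j ft lt tl
      obtain ⟨t, j'⟩ := hd
      by_cases h : j' = j
      · simp [pvGrpStep, pvGrpF, h, ih]
      · simp [pvGrpStep, pvGrpF, h, ih]

theorem pvGrpF_head (l : List (Int × Int)) : ∀ (j ft lt : Int),
    ∃ lt' tl, pvGrpF j ft lt l = (j, ft, lt') :: tl := by
  induction l with
  | nil => intro j ft lt; exact ⟨lt, [], rfl⟩
  | cons hd r ih =>
      intro j ft lt
      obtain ⟨t, j'⟩ := hd
      by_cases h : j' = j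
      · simpa [pvGrpF, h] using ih j ft t
      · exact ⟨lt, pvGrpF j' t t r, by simp [pvGrpF, h]⟩

-- last first-coordinate of the remaining path, seeded with the current one
def pvFinalT (lt : Int) : List (Int × Int) → Int
  | [] => lt
  | (t, _) :: r => pvFinalT t r

theorem pvEmit_grpF (transcript : String) (l : List (Int × Int)) :
    ∀ (j ft lt : Int),
    pvEmit transcript (pvGrpF j ft lt l) = pvSpecA transcript ft j (pvFinalT lt l) l := by
  induction l with
  | nil => intro j ft lt; simp [pvGrpF, pvFinalT, pvEmit, pvSpecA]
  | cons hd r ih =>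
      intro j ft lt
      obtain ⟨t, j'⟩ := hd
      by_cases h : j' = j
      · simp [pvGrpF, pvSpecA, pvFinalT, h, ih]
      · obtain ⟨lt2, tl2, h2⟩ := pvGrpF_head r j' t t
        simp only [pvGrpF, if_neg h, pvSpecA, pvFinalT]
        rw [h2, pvEmit, ← h2, ih]
        simp [h]

theorem pvFinalT_eq_last (rest : List (Int × Int)) : ∀ (t0 j0 : Int),
    ((PySem.List.pyGet? ((t0, j0) :: rest) (-1)).getD (0, 0)).1 = pvFinalT t0 rest := by
  induction rest with
  | nil => intro t0 j0; simp [PySem.List.pyGet?_neg_one, pvFinalT]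
  | cons hd r ih =>
      intro t0 j0
      obtain ⟨t, j⟩ := hd
      have h1 : PySem.List.pyGet? ((t0, j0) :: (t, j) :: r) (-1)
          = PySem.List.pyGet? ((t, j) :: r) (-1) := by
        simp [PySem.List.pyGet?_neg_one, List.getLast?_cons_cons]
      rw [h1]
      exact ih t j

-- ===== VERDICT (by name: the statement is the Claim_ definition above) =====
theorem merge_repeats_py_spec : Claim_equal_merge_repeats_py := by
  intro path transcript _ hpre
  unfold Spec_merge_repeats_py
  obtain ⟨hne, _⟩ := hpre
  match path with
  | [] => exact absurd rfl hne
  | (t0, j0) :: rest =>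
      unfold merge_repeats_py merge_repeats_py_alt
      have hA := pvA_fold transcript rest t0 j0
        (((PySem.List.pyGet? ((t0, j0) :: rest) (-1)).getD (0, 0)).1) []
      have hB : (((t0, j0) :: rest).foldl pvGrpStep []).reverse = pvGrpF j0 t0 t0 rest := by
        have := pvGrp_fold rest j0 t0 t0 []
        simpa [pvGrpStep] using this
      simp only [hB, pvEmit_grpF, pvFinalT_eq_last]
      simp only [List.nil_append] at hA
      rw [pvFinalT_eq_last] at hA
      exact hA
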